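-- pv_equiv track=rewrite | github.com/luckylyk/montunolito | data.py | generate_notearray_scale
-- ===== SOURCE A (Python) =====
-- SCALES = dict(
--     major = [0, 2, 4, 5, 7, 9, 11],
--     minor = [0, 2, 3, 5, 7, 8, 10])
--
-- CHORDS = dict(
--     Major = [0, 4, 7, 12, 19],
--     Minor = [0, 3, 7, 12, 19],
--     M6 =    [0, 4, 7, 9, 12],
--     m6 =    [0, 3, 7, 9, 12],
--     M7 =    [0, 4, 7, 10, 12],
--     m7 =    [0, 3, 7, 10, 12],
--     M7M =   [0, 4, 7, 11, 12],
--     m7M =   [0, 3, 7, 11, 12],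
--     M7b9 =  [0, 4, 7, 10, 13],
--     m7b9 =  [0, 3, 7, 10, 13],
--     M9 =    [0, 4, 7, 10, 14],
--     m9 =    [0, 3, 7, 10, 14],
--     M11 =   [0, 4, 10, 14, 17],
--     m11 =   [0, 3, 10, 14, 17],
--     dim =   [0, 3, 6, 10, 12],
--     sus4 =  [0, 5, 7, 12, 19],
--     aug =   [0, 4, 8, 12, 19],
--     qm =    [0, 4, 6, 12, 19])
--
-- CHORD_SCALES_REMPLACEMENT_INDEXES = dict(
--     m6 =    {5: 3},
--     M7 =    {6: 3},
--     m7M =   {6: 3},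
--     M7b9 =  {6: 3, 1: 4},
--     m7b9 =  {1: 4},
--     dim =   {4: 2},
--     aug =   {4: 2},
--     qm =    {4: 2})
--
-- SCALENAME_BY_CHORDNAME = dict(
--     major = ('Major', 'M6', 'M7', 'M7M', 'M7b9', 'M9', 'M11', 'Sus4', 'aug'),
--     minor = ('Minor', 'm6', 'm7', 'm7M', 'm7b9', 'm9', 'm11', 'dim', 'qm'))
--
-- def remap_array(array, offset=0, value=10):
--     ''' this method remap an array int between 0 and value '''
--     return [remap_number(number + offset, value=value) for number in array]
--
-- def remap_number(number, value=10):
--     ''' this method remap an int between 0 and value '''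
--     while number > value - 1:
--         number -= value
--     while number < 0:
--         number += value
--     return number
--
-- def generate_notearray_scale(chord, tonality):
--     '''
--     This method returns and number array contain degree as scale.
--     '''
--     for scalename, chordnames in SCALENAME_BY_CHORDNAME.items():
--         if chord['name'] in chordnames:
--             scale = SCALES[scalename][:]
--             replacements = CHORD_SCALES_REMPLACEMENT_INDEXES.get(chord['name'])
--             if replacements:
--                 for scale_index, chord_index in replacements.items():
--                     scale[scale_index] = CHORDS[chord['name']][chord_index]
--
--             return remap_array(array=scale, offset=tonality, value=12)
-- ===== SOURCE B (Python) =====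
-- # B: the chord-name -> adjusted-scale table is precomputed once as a flat literal
-- # lookup, and the two while-loop remap helpers are replaced by a single modulo.
-- SCALE_BY_CHORDNAME = {
--     'Major': [0, 2, 4, 5, 7, 9, 11],
--     'M6':    [0, 2, 4, 5, 7, 9, 11],
--     'M7':    [0, 2, 4, 5, 7, 9, 10],
--     'M7M':   [0, 2, 4, 5, 7, 9, 11],
--     'M7b9':  [0, 13, 4, 5, 7, 9, 10],
--     'M9':    [0, 2, 4, 5, 7, 9, 11],
--     'M11':   [0, 2, 4, 5, 7, 9, 11],
--     'Sus4':  [0, 2, 4, 5, 7, 9, 11],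
--     'aug':   [0, 2, 4, 5, 8, 9, 11],
--     'Minor': [0, 2, 3, 5, 7, 8, 10],
--     'm6':    [0, 2, 3, 5, 7, 9, 10],
--     'm7':    [0, 2, 3, 5, 7, 8, 10],
--     'm7M':   [0, 2, 3, 5, 7, 8, 11],
--     'm7b9':  [0, 13, 3, 5, 7, 8, 10],
--     'm9':    [0, 2, 3, 5, 7, 8, 10],
--     'm11':   [0, 2, 3, 5, 7, 8, 10],
--     'dim':   [0, 2, 3, 5, 6, 8, 10],
--     'qm':    [0, 2, 3, 5, 6, 8, 10],
-- }
--
-- def generate_notearray_scale(chord, tonality):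
--     scale = SCALE_BY_CHORDNAME.get(chord['name'])
--     if scale is None:
--         return None
--     return [(note + tonality) % 12 for note in scale]
-- ===== Notes on version B (the rewrite author's own statement) =====
-- stated objective: simpler
-- what changed: B replaces the scan over SCALENAME_BY_CHORDNAME plus the in-place index replacements and the two while-loop remap helpers by one precomputed chord-name-to-adjusted-scale literal dict and a single closed-form (note + tonality) % 12 comprehension.
-- outside the precondition, e.g. on generate_notearray_scale({'name': 'xx'}, 0): A returns None, B returns None
import Mathlib
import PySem

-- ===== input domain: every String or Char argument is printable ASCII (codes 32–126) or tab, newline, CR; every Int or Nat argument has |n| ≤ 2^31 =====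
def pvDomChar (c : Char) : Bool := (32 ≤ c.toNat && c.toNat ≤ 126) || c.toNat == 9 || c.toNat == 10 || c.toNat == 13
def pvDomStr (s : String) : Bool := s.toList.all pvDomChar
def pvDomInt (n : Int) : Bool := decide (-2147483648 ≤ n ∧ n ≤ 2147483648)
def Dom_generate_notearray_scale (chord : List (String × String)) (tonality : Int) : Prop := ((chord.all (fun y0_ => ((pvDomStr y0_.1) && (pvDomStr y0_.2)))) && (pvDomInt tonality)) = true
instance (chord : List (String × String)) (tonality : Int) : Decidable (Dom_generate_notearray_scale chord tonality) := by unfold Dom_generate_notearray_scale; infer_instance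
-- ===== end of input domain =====

-- B replaces A's scan + in-place replacements + two while-loop remap helpers by one
-- precomputed chord-name → adjusted-scale literal table and a closed-form (note+tonality) % 12.

-- ===== PORT A =====
def pySCALES : PySem.Dict String (List Int) :=
  PySem.Dict.ofList [("major", [0, 2, 4, 5, 7, 9, 11]), ("minor", [0, 2, 3, 5, 7, 8, 10])]

def pyCHORDS : PySem.Dict String (List Int) :=
  PySem.Dict.ofList
    [("Major", [0, 4, 7, 12, 19]), ("Minor", [0, 3, 7, 12, 19]),
     ("M6", [0, 4, 7, 9, 12]), ("m6", [0, 3, 7, 9, 12]),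
     ("M7", [0, 4, 7, 10, 12]), ("m7", [0, 3, 7, 10, 12]),
     ("M7M", [0, 4, 7, 11, 12]), ("m7M", [0, 3, 7, 11, 12]),
     ("M7b9", [0, 4, 7, 10, 13]), ("m7b9", [0, 3, 7, 10, 13]),
     ("M9", [0, 4, 7, 10, 14]), ("m9", [0, 3, 7, 10, 14]),
     ("M11", [0, 4, 10, 14, 17]), ("m11", [0, 3, 10, 14, 17]),
     ("dim", [0, 3, 6, 10, 12]), ("sus4", [0, 5, 7, 12, 19]),
     ("aug", [0, 4, 8, 12, 19]), ("qm", [0, 4, 6, 12, 19])]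

-- inner replacement dicts kept as their (scale_index, chord_index) item lists in insertion order
def pyREPL : PySem.Dict String (List (Int × Int)) :=
  PySem.Dict.ofList
    [("m6", [(5, 3)]), ("M7", [(6, 3)]), ("m7M", [(6, 3)]),
     ("M7b9", [(6, 3), (1, 4)]), ("m7b9", [(1, 4)]),
     ("dim", [(4, 2)]), ("aug", [(4, 2)]), ("qm", [(4, 2)])]

def pySCALENAME_BY_CHORDNAME : List (String × List String) :=
  [("major", ["Major", "M6", "M7", "M7M", "M7b9", "M9", "M11", "Sus4", "aug"]),
   ("minor", ["Minor", "m6", "m7", "m7M", "m7b9", "m9", "m11", "dim", "qm"])]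

-- remap_number's first while loop: while number > value - 1: number -= value   (value = 12)
def remapNumberDown (number : Int) : Int :=
  if h : number > 12 - 1 then remapNumberDown (number - 12) else number
termination_by number.toNat
decreasing_by omega

-- remap_number's second while loop: while number < 0: number += value   (value = 12)
def remapNumberUp (number : Int) : Int :=
  if h : number < 0 then remapNumberUp (number + 12) else number
termination_by (-number).toNat
decreasing_by omega

def remap_number (number : Int) : Int := remapNumberUp (remapNumberDown number)

def remap_array (array : List Int) (offset : Int) : List Int :=
  array.map (fun number => remap_number (number + offset))

-- the 'for scalename, chordnames in SCALENAME_BY_CHORDNAME.items():' loop with early return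
def gnsLoop (name : String) (tonality : Int) : List (String × List String) → List Int
  | [] => []    -- Python falls off and returns None here; excluded by Pre_
  | (scalename, chordnames) :: rest =>
    if name ∈ chordnames then
      let scale := (pySCALES.get? scalename).getD []
      let scale :=
        match pyREPL.get? name with
        | some repl =>
            repl.foldl
              (fun sc p =>
                PySem.List.pySetD sc p.1 (PySem.List.pyGetD ((pyCHORDS.get? name).getD []) p.2 0))
              scale
        | none => scale
      remap_array scale tonality
    else gnsLoop name tonality rest

def generate_notearray_scale (chord : List (String × String)) (tonality : Int) : List Int :=
  match (PySem.Dict.mk chord).get? "name" with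
  | none => []    -- Python raises KeyError here; excluded by Pre_
  | some name => gnsLoop name tonality pySCALENAME_BY_CHORDNAME

-- ===== PORT B =====
def scaleByChordname : PySem.Dict String (List Int) :=
  PySem.Dict.ofList
    [("Major", [0, 2, 4, 5, 7, 9, 11]), ("M6", [0, 2, 4, 5, 7, 9, 11]),
     ("M7", [0, 2, 4, 5, 7, 9, 10]), ("M7M", [0, 2, 4, 5, 7, 9, 11]),
     ("M7b9", [0, 13, 4, 5, 7, 9, 10]), ("M9", [0, 2, 4, 5, 7, 9, 11]),
     ("M11", [0, 2, 4, 5, 7, 9, 11]), ("Sus4", [0, 2, 4, 5, 7, 9, 11]),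
     ("aug", [0, 2, 4, 5, 8, 9, 11]),
     ("Minor", [0, 2, 3, 5, 7, 8, 10]), ("m6", [0, 2, 3, 5, 7, 9, 10]),
     ("m7", [0, 2, 3, 5, 7, 8, 10]), ("m7M", [0, 2, 3, 5, 7, 8, 11]),
     ("m7b9", [0, 13, 3, 5, 7, 8, 10]), ("m9", [0, 2, 3, 5, 7, 8, 10]),
     ("m11", [0, 2, 3, 5, 7, 8, 10]), ("dim", [0, 2, 3, 5, 6, 8, 10]),
     ("qm", [0, 2, 3, 5, 6, 8, 10])]

def generate_notearray_scale_alt (chord : List (String × String)) (tonality : Int) : List Int :=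
  match (PySem.Dict.mk chord).get? "name" with
  | none => []    -- Python raises KeyError; excluded by Pre_
  | some name =>
    match scaleByChordname.get? name with
    | none => []    -- Python returns None; excluded by Pre_
    | some scale => scale.map (fun note => PySem.Int.mod (note + tonality) 12)

-- ===== PRECONDITION & SPEC =====
-- Pre_ excludes chords without a 'name' key (A raises KeyError) and chords whose name is not a
-- known chord name (A returns None, which is not a list of ints; B returns None there too).
def pvKnownChordNames : List String :=
  ["Major", "M6", "M7", "M7M", "M7b9", "M9", "M11", "Sus4", "aug",
   "Minor", "m6", "m7", "m7M", "m7b9", "m9", "m11", "dim", "qm"]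

def Pre_generate_notearray_scale (chord : List (String × String)) (tonality : Int) : Prop :=
  (((PySem.Dict.mk chord).get? "name").map (fun name => decide (name ∈ pvKnownChordNames))).getD false = true
instance (chord : List (String × String)) (tonality : Int) : Decidable (Pre_generate_notearray_scale chord tonality) := by unfold Pre_generate_notearray_scale; infer_instance

def pvWitness_generate_notearray_scale : (List (String × String)) × Int := ([("name", "m7b9")], 3)

def Spec_generate_notearray_scale (chord : List (String × String)) (tonality : Int) (out : List Int) : Prop := out = generate_notearray_scale_alt chord tonality
instance (chord : List (String × String)) (tonality : Int) (out : List Int) : Decidable (Spec_generate_notearray_scale chord tonality out) := by unfold Spec_generate_notearray_scale; infer_instance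

-- ===== CLAIM (what is proved, stated in full; the proofs are below) =====
def Claim_equal_generate_notearray_scale : Prop := ∀ (chord : List (String × String)) (tonality : Int), Dom_generate_notearray_scale chord tonality → Pre_generate_notearray_scale chord tonality → Spec_generate_notearray_scale chord tonality (generate_notearray_scale chord tonality)

-- ===== LEMMAS AND PROOFS =====
theorem remapNumberDown_spec (n : Int) :
    remapNumberDown n % 12 = n % 12 ∧ remapNumberDown n ≤ 11 := by
  induction n using remapNumberDown.induct with
  | case1 n h ih =>
      rw [remapNumberDown, dif_pos h]
      exact ⟨by omega, ih.2⟩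
  | case2 n h =>
      rw [remapNumberDown, dif_neg h]
      exact ⟨rfl, by omega⟩

theorem remapNumberUp_spec (n : Int) :
    remapNumberUp n % 12 = n % 12 ∧ 0 ≤ remapNumberUp n ∧ (n ≤ 11 → remapNumberUp n ≤ 11) := by
  induction n using remapNumberUp.induct with
  | case1 n h ih =>
      rw [remapNumberUp, dif_pos h]
      exact ⟨by omega, ih.2.1, fun _ => ih.2.2 (by omega)⟩
  | case2 n h =>
      rw [remapNumberUp, dif_neg h]
      exact ⟨rfl, by omega, fun h' => h'⟩

theorem remap_number_eq_mod (n : Int) : remap_number n = PySem.Int.mod n 12 := by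
  rw [PySem.Int.mod_eq_emod_of_pos (by norm_num)]
  unfold remap_number
  obtain ⟨hd, hd2⟩ := remapNumberDown_spec n
  obtain ⟨hu, hu2, hu3⟩ := remapNumberUp_spec (remapNumberDown n)
  have := hu3 hd2
  omega

-- ===== VERDICT (by name: the statement is the Claim_ definition above) =====
theorem remap_array_eq (s : List Int) (t : Int) :
    remap_array s t = s.map (fun note => PySem.Int.mod (note + t) 12) := by
  simp [remap_array, remap_number_eq_mod]

theorem generate_notearray_scale_spec : Claim_equal_generate_notearray_scale := by
  intro chord tonality _ hPre
  unfold Spec_generate_notearray_scale generate_notearray_scale generate_notearray_scale_alt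
  unfold Pre_generate_notearray_scale at hPre
  cases h : (PySem.Dict.mk chord).get? "name" with
  | none => simp [h] at hPre
  | some name =>
      rw [h] at hPre
      simp only [Option.map_some, Option.getD_some, decide_eq_true_eq, pvKnownChordNames,
        List.mem_cons, List.not_mem_nil, or_false] at hPre
      rcases hPre with rfl | rfl | rfl | rfl | rfl | rfl | rfl | rfl | rfl | rfl | rfl | rfl | rfl | rfl | rfl | rfl | rfl | rfl <;>
        exact remap_array_eq _ tonality
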